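-- pv_equiv track=rewrite | github.com/nguyenvantu11052002/Python-PTIT | PY01059 - TỔNG CHỮ SỐ - TÍCH CHỮ SỐ.py | tich
-- ===== SOURCE A (Python) =====
-- def solve(s):
--     res = 1
--     for i in range(1, len(s), 2):
--         if int(s[i]) != 0:
--             res *= int(s[i])
--     return res
--
-- def tich(s):
--     ok = False
--     for i in range(1, len(s), 2):
--         if int(s[i]) != 0:
--             ok = True
--             break
--     if ok == False:
--         return 0
--     else:
--         return solve(s)
-- ===== SOURCE B (Python) =====
-- def tich(s):
--     if len(s) < 2:
--         return 0
--     d = int(s[1])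
--     rest = tich(s[2:])
--     if d == 0:
--         return rest
--     return d if rest == 0 else d * rest
-- ===== Notes on version B (the rewrite author's own statement) =====
-- stated objective: alternative
-- what changed: A does two staged index loops (an existence scan with break, then a product loop in solve()) with an ok flag; B is a single self-recursion that consumes the string two characters at a time, combining the current odd-position digit with the recursive result and using the value 0 itself as the empty sentinel (sound because a product of nonzero digits is never 0), so it keeps no flag and never rescans.
import Mathlib
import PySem

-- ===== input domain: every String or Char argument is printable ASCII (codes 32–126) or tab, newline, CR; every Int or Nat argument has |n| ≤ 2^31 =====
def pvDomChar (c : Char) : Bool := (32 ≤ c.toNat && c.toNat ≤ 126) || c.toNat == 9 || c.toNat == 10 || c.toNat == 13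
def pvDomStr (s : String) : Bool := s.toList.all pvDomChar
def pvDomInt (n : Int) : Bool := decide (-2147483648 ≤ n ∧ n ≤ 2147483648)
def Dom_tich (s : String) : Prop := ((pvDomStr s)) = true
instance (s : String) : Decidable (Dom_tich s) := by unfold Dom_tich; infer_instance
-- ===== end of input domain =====

-- B replaces A's two staged index loops (existence scan with break + product loop) by one
-- self-recursion eating the string two characters at a time, with 0 as the 'nothing found'
-- sentinel (a product of nonzero digits is never 0); objective: alternative.

-- ===== PORT A =====
-- int(c) for a single character c; total form, used only under Pre_ (odd-position chars are digits)
def pvCharInt (c : Char) : Int := (PySem.Int.ofChars? [c]).getD 0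

-- the 'for i in …: if int(s[i]) != 0: ok = True; break' loop of tich
def pvOkLoop (cs : List Char) : List Int → Bool
  | [] => false
  | i :: rest =>
      if pvCharInt (PySem.List.pyGetD cs i ' ') ≠ 0 then true else pvOkLoop cs rest

-- helper solve(s)
def pvSolve (s : String) : Int :=
  (PySem.List.pyRange 1 (s.toList.length : Int) 2).foldl
    (fun res i =>
      if pvCharInt (PySem.List.pyGetD s.toList i ' ') ≠ 0
      then res * pvCharInt (PySem.List.pyGetD s.toList i ' ')
      else res) 1

def tich (s : String) : Int :=
  if pvOkLoop s.toList (PySem.List.pyRange 1 (s.toList.length : Int) 2) = false then 0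
  else pvSolve s

-- ===== PORT B =====
-- Source B's recursion 'if len(s) < 2: return 0; d = int(s[1]); rest = tich(s[2:]); …',
-- transcribed as structural recursion on the character list (s[2:] = the tail after two chars)
def pvTichRec : List Char → Int
  | [] => 0
  | [_] => 0
  | _ :: b :: t =>
      let d := pvCharInt b
      let rest := pvTichRec t
      if d = 0 then rest else if rest = 0 then d else d * rest

def tich_alt (s : String) : Int := pvTichRec s.toList

-- ===== PRECONDITION & SPEC =====
-- Python's int(s[i]) raises ValueError unless the character is a decimal digit:
-- Pre_ requires every character at an odd index to be a decimal digit (exactly where A returns normally).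
def Pre_tich (s : String) : Prop :=
  ∀ i, i < s.toList.length → i % 2 = 1 →
    ('0' ≤ s.toList.getD i ' ' ∧ s.toList.getD i ' ' ≤ '9')
instance (s : String) : Decidable (Pre_tich s) := by unfold Pre_tich; infer_instance

def pvWitness_tich : String := "1024"

def Spec_tich (s : String) (out : Int) : Prop := out = tich_alt s
instance (s : String) (out : Int) : Decidable (Spec_tich s out) := by unfold Spec_tich; infer_instance

-- ===== CLAIM (what is proved, stated in full; the proofs are below) =====
def Claim_equal_tich : Prop := ∀ (s : String), Dom_tich s → Pre_tich s → Spec_tich s (tich s)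

-- ===== LEMMAS AND PROOFS =====

-- the characters at odd positions, by alternating selection (proof-side view of both programs)
def pvSel : Bool → List Char → List Char
  | _, [] => []
  | false, _ :: t => pvSel true t
  | true, a :: t => a :: pvSel false t

-- the nonzero odd-position digits, as integers
def pvP (cs : List Char) : List Int :=
  ((pvSel false cs).filter (fun c => decide (pvCharInt c ≠ 0))).map pvCharInt

theorem pvP_ne_zero (cs : List Char) : (0 : Int) ∉ pvP cs := by
  unfold pvP
  simp only [List.mem_map, List.mem_filter, decide_eq_true_eq, not_exists]
  rintro c ⟨⟨-, hc⟩, h0⟩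
  exact hc h0

theorem pvOkLoop_eq_any (cs : List Char) (idxs : List Int) :
    pvOkLoop cs idxs = idxs.any (fun i => pvCharInt (PySem.List.pyGetD cs i ' ') ≠ 0) := by
  induction idxs with
  | nil => rfl
  | cons i rest ih => by_cases h : pvCharInt (PySem.List.pyGetD cs i ' ') ≠ 0 <;>
      simp [pvOkLoop, h, ih]

theorem pvRangeMap_sel_aux (d : Char) :
    ∀ cs : List Char,
      (List.range (cs.length / 2)).map (fun k => cs.getD (1 + 2 * k) d) = pvSel false cs
  | [] => by simp [pvSel]
  | [a] => by simp [pvSel]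
  | a :: b :: t => by
      have ih := pvRangeMap_sel_aux d t
      have hlen : (a :: b :: t).length / 2 = t.length / 2 + 1 := by
        simp [List.length_cons]; omega
      have hsel : pvSel false (a :: b :: t) = b :: pvSel false t := by simp [pvSel]
      rw [hlen, List.range_succ_eq_map, List.map_cons, List.map_map, hsel]
      refine congrArg₂ (· :: ·) rfl ?_
      rw [← ih]
      apply List.map_congr_left
      intro k _
      show (a :: b :: t).getD (1 + 2 * (k + 1)) d = t.getD (1 + 2 * k) d
      have hidx : 1 + 2 * (k + 1) = (1 + 2 * k) + 1 + 1 := by ring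
      rw [hidx, List.getD_cons_succ, List.getD_cons_succ]

-- bridge: A's index range over odd i with s[i] is exactly the odd-position characters
theorem pvRangeMap_sel (cs : List Char) (d : Char) :
    (PySem.List.pyRange 1 (cs.length : Int) 2).map (fun i => PySem.List.pyGetD cs i d)
      = pvSel false cs := by
  rw [PySem.List.pyRange_of_pos 1 (cs.length : Int) (by norm_num)]
  have hm : (if (1 : Int) < (cs.length : Int)
      then (((cs.length : Int) - 1 + 2 - 1) / 2).toNat else 0) = cs.length / 2 := by
    split_ifs with h
    · omega
    · omega
  rw [hm, List.map_map, ← pvRangeMap_sel_aux d cs]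
  apply List.map_congr_left
  intro k _
  have h1 : (1 : Int) + 2 * (k : Int) = ((1 + 2 * k : Nat) : Int) := by push_cast; ring
  simp only [Function.comp, h1, PySem.List.pyGetD_natCast]

-- characterisation of B's recursion: 0 if no nonzero odd digit, else their product
theorem pvTichRec_eq : ∀ cs : List Char,
    pvTichRec cs = if pvP cs = [] then 0 else (pvP cs).prod
  | [] => by simp [pvTichRec, pvP, pvSel]
  | [a] => by simp [pvTichRec, pvP, pvSel]
  | a :: b :: t => by
      have ih := pvTichRec_eq t
      have hsel : pvSel false (a :: b :: t) = b :: pvSel false t := by simp [pvSel]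
      have hprodne : (pvP t).prod ≠ 0 := List.prod_ne_zero (pvP_ne_zero t)
      by_cases hb : pvCharInt b = 0
      · have hP : pvP (a :: b :: t) = pvP t := by
          simp [pvP, hsel, hb]
        simp only [pvTichRec, hb, hP]
        exact ih
      · have hP : pvP (a :: b :: t) = pvCharInt b :: pvP t := by
          simp [pvP, hsel, hb]
        simp only [pvTichRec, if_neg hb, hP]
        by_cases ht : pvP t = []
        · rw [ih, if_pos ht, if_pos rfl, if_neg (by simp [ht]), ht, List.prod_cons,
            List.prod_nil, mul_one]
        · rw [ih, if_neg ht, if_neg hprodne, if_neg (by simp), List.prod_cons]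

-- ===== VERDICT (by name: the statement is the Claim_ definition above) =====
theorem tich_spec : Claim_equal_tich := by
  intro s _ _
  unfold Spec_tich tich tich_alt pvSolve
  set cs := s.toList with hcs
  set q : Char → Bool := fun c => decide (pvCharInt c ≠ 0) with hq
  have hA := pvRangeMap_sel cs ' '
  have hok : pvOkLoop cs (PySem.List.pyRange 1 (cs.length : Int) 2)
      = (pvSel false cs).any q := by
    rw [pvOkLoop_eq_any, ← hA, List.any_map]
    rfl
  have hfold : (PySem.List.pyRange 1 (cs.length : Int) 2).foldl
      (fun res i => if pvCharInt (PySem.List.pyGetD cs i ' ') ≠ 0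
        then res * pvCharInt (PySem.List.pyGetD cs i ' ') else res) 1
      = (pvP cs).foldl (fun r d => r * d) 1 := by
    unfold pvP
    rw [List.foldl_map, List.foldl_filter, ← hA, List.foldl_map]
    apply PySem.List.foldl_congr_mem
    intro r i _
    by_cases h : pvCharInt (PySem.List.pyGetD cs i ' ') ≠ 0 <;> simp [h]
  have hanyP : (pvSel false cs).any q = true ↔ pvP cs ≠ [] := by
    unfold pvP
    simp [hq, List.any_eq_true, List.filter_eq_nil_iff]
  rw [pvTichRec_eq, hok, hfold]
  by_cases hany : (pvSel false cs).any q = true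
  · have hne : pvP cs ≠ [] := hanyP.mp hany
    rw [if_neg (by simp [hany]), if_neg hne, ← List.prod_eq_foldl]
  · have hP : pvP cs = [] := by
      by_contra h
      exact hany (hanyP.mpr h)
    rw [if_pos (by simpa using hany), if_pos hP]
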